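-- pv_equiv track=rewrite | github.com/MarcioSmall/merlin | calc/calculator/variable.py | copia_string_ate_caracter
-- ===== SOURCE A (Python) =====
-- def copia_string_ate_caracter(str, chr=' '):
--     str_aux = ''
--     pos = 0
--     for letra in str:
--         if letra in chr:
--             return (str_aux, pos)
--         str_aux += letra
--         pos += 1
--     return (str_aux, pos)
-- ===== SOURCE B (Python) =====
-- def copia_string_ate_caracter(str, chr=' '):
--     pos = next((i for i, c in enumerate(str) if c in chr), len(str))
--     return (str[:pos], pos)
-- ===== Notes on version B (the rewrite author's own statement) =====
-- stated objective: simpler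
-- what changed: Replaces the incremental concatenate-and-count loop with a two-phase locate-then-slice: find the first index whose character is in chr, then return the slice up to it; avoids quadratic string building.
import Mathlib
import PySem

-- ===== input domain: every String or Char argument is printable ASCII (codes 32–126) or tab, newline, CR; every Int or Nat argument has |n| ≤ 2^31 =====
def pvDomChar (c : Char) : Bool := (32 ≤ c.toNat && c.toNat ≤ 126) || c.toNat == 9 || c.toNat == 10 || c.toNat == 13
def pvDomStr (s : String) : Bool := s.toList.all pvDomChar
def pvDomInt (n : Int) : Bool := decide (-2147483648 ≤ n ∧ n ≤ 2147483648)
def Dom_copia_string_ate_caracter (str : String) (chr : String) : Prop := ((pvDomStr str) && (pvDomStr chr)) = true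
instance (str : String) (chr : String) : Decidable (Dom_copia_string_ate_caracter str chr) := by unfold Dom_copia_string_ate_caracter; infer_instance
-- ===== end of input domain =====

-- B replaces A's incremental concatenate-and-count loop by locate-then-slice (objective: simpler).
-- ===== PORT A =====
def copiaLoopA (chr : String) (cs : List Char) (straux : List Char) (pos : Int) : String × Int :=
  match cs with
  | [] => (String.mk straux, pos)
  | letra :: rest =>
    if letra ∈ chr.toList then (String.mk straux, pos)
    else copiaLoopA chr rest (straux ++ [letra]) (pos + 1)

def copia_string_ate_caracter (str : String) (chr : String) : String × Int :=
  copiaLoopA chr str.toList [] 0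

-- ===== PORT B =====
def copia_string_ate_caracter_alt (str : String) (chr : String) : String × Int :=
  let pos : Nat := (str.toList.findIdx? (fun c => c ∈ chr.toList)).getD str.toList.length
  (String.mk (str.toList.take pos), (pos : Int))

-- ===== PRECONDITION & SPEC =====
def Spec_copia_string_ate_caracter (str : String) (chr : String) (out : String × Int) : Prop := out = copia_string_ate_caracter_alt str chr
instance (str : String) (chr : String) (out : String × Int) : Decidable (Spec_copia_string_ate_caracter str chr out) := by unfold Spec_copia_string_ate_caracter; infer_instance

-- ===== CLAIM (what is proved, stated in full; the proofs are below) =====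
def Claim_equal_copia_string_ate_caracter : Prop := ∀ (str : String) (chr : String), Dom_copia_string_ate_caracter str chr → Spec_copia_string_ate_caracter str chr (copia_string_ate_caracter str chr)

-- ===== LEMMAS AND PROOFS =====
theorem copiaLoopA_eq (chr : String) (cs : List Char) (acc : List Char) (pos : Int) :
    copiaLoopA chr cs acc pos =
      (String.mk (acc ++ cs.take ((cs.findIdx? (fun c => c ∈ chr.toList)).getD cs.length)),
       pos + ((cs.findIdx? (fun c => c ∈ chr.toList)).getD cs.length : Nat)) := by
  induction cs generalizing acc pos with
  | nil => simp [copiaLoopA]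
  | cons c rest ih =>
    by_cases h : c ∈ chr.toList
    · simp [copiaLoopA, h, List.findIdx?_cons]
    · simp only [copiaLoopA, h, if_false, ih, List.findIdx?_cons, decide_eq_true_eq]
      cases hf : rest.findIdx? (fun c => c ∈ chr.toList) with
      | none => simp [hf, Prod.ext_iff]; omega
      | some k => simp [hf, List.take_succ_cons, Prod.ext_iff]; omega

-- ===== VERDICT (by name: the statement is the Claim_ definition above) =====
theorem copia_string_ate_caracter_spec : Claim_equal_copia_string_ate_caracter := by
  intro str chr _
  unfold Spec_copia_string_ate_caracter copia_string_ate_caracter copia_string_ate_caracter_alt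
  simp [copiaLoopA_eq]
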